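-- pv_equiv track=rewrite | github.com/ehauckdo/mario | metrics.py | findCannons
-- ===== SOURCE A (Python) =====
-- def findCannons(map_matrix):
-- 	count = 0
-- 	y = 0
-- 	y_len = len(map_matrix[0])
-- 	x_len = len(map_matrix)
-- 	while y < y_len:
-- 		asterisk = 0 # whether there is * in the column
-- 		B = 0 		 # how many cannon heads
-- 		x = 0
-- 		while x < x_len:
-- 			if map_matrix[x][y] == "*":
-- 				asterisk = 1
-- 			if map_matrix[x][y] == "B":
-- 				B +=1
-- 			x += 1
-- 		y += 1
-- 		count += asterisk + B
-- 	return count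
-- ===== SOURCE B (Python) =====
-- def findCannons(map_matrix):
--     # Row-major single pass: a global counter of 'B' cells plus a set of the
--     # distinct column indices that contain '*'; columns beyond the first row's
--     # width are ignored, as in the original column-wise scan.
--     width = len(map_matrix[0])
--     b_total = 0
--     star_cols = set()
--     for row in map_matrix:
--         for y, c in enumerate(row[:width]):
--             if c == "B":
--                 b_total += 1
--             elif c == "*":
--                 star_cols.add(y)
--     return b_total + len(star_cols)
-- ===== Notes on version B (the rewrite author's own statement) =====
-- stated objective: faster
-- what changed: Replaces the column-by-column scan with per-column flag and counter (double indexing per cell) by a single row-major pass keeping one global counter of 'B' cells and a set of the distinct column indices containing '*'; the row-contiguous traversal avoids per-cell double indexing, a constant-factor speedup.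
import Mathlib
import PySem

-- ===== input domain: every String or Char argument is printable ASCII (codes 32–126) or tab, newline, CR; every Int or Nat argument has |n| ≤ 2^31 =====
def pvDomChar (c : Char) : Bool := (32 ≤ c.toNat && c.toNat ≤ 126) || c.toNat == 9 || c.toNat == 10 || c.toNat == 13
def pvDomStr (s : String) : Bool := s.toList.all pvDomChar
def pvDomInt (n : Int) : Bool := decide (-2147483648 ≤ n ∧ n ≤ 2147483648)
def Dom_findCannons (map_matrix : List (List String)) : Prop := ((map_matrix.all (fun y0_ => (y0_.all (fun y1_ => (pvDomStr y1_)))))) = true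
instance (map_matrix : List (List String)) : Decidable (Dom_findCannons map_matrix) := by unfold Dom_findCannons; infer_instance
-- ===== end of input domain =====

-- B replaces A's column-by-column flag/counter scan by a single row-major pass
-- keeping one global counter of 'B' cells and a set of the distinct column
-- indices containing '*' (measured constant-factor speedup: no per-cell double
-- indexing). Equivalence is about the return value; neither mutates its argument.

-- ===== PORT A =====
-- literal port of A's nested while loops: outer over columns y, inner over rows x
def findCannons (map_matrix : List (List String)) : Int :=
  let y_len := ((PySem.List.pyGet? map_matrix (0 : Int)).getD []).length
  let x_len := map_matrix.length
  (List.range y_len).foldl (fun count (y : Nat) =>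
    let p := (List.range x_len).foldl (fun (p : Int × Int) (x : Nat) =>
      let c := (PySem.List.pyGet? ((PySem.List.pyGet? map_matrix (x : Int)).getD []) (y : Int)).getD ""
      let asterisk := if c = "*" then (1 : Int) else p.1
      let B := if c = "B" then p.2 + 1 else p.2
      (asterisk, B)) (0, 0)
    count + p.1 + p.2) 0

-- ===== PORT B =====
-- the body of Source B's inner 'for y, c in enumerate(row[:width])' loop
def cellStep (q : Int × PySem.Set Int) (yc : Int × String) : Int × PySem.Set Int :=
  if yc.2 = "B" then (q.1 + 1, q.2)
  else if yc.2 = "*" then (q.1, PySem.Set.add q.2 yc.1)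
  else q

-- one row of Source B's outer loop
def rowStep (width : Nat) (p : Int × PySem.Set Int) (row : List String) : Int × PySem.Set Int :=
  (PySem.List.enumerate (PySem.List.slice row (some 0) (some (width : Int))) 0).foldl cellStep p

def findCannons_alt (map_matrix : List (List String)) : Int :=
  let width := ((PySem.List.pyGet? map_matrix (0 : Int)).getD []).length
  let p := map_matrix.foldl (rowStep width) ((0 : Int), (PySem.Set.empty : PySem.Set Int))
  p.1 + (p.2.length : Int)

-- ===== PRECONDITION & SPEC =====
-- Pre_ excludes exactly the inputs on which A raises IndexError: the empty matrix
-- (map_matrix[0]) and matrices with some row shorter than the first row.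
def Pre_findCannons (map_matrix : List (List String)) : Prop :=
  map_matrix ≠ [] ∧ ∀ r ∈ map_matrix, (map_matrix.headD []).length ≤ r.length
instance (map_matrix : List (List String)) : Decidable (Pre_findCannons map_matrix) := by
  unfold Pre_findCannons; infer_instance
def pvWitness_findCannons : List (List String) := [["*", "B"], ["B", "B"]]

def Spec_findCannons (map_matrix : List (List String)) (out : Int) : Prop := out = findCannons_alt map_matrix
instance (map_matrix : List (List String)) (out : Int) : Decidable (Spec_findCannons map_matrix out) := by unfold Spec_findCannons; infer_instance

-- ===== CLAIM (what is proved, stated in full; the proofs are below) =====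
def Claim_equal_findCannons : Prop := ∀ (map_matrix : List (List String)), Dom_findCannons map_matrix → Pre_findCannons map_matrix → Spec_findCannons map_matrix (findCannons map_matrix)

-- ===== LEMMAS AND PROOFS =====

-- the y-th column of m (entries m[x][y])
def colAt (m : List (List String)) (y : Nat) : List String :=
  m.map (fun r => r.getD y "")

-- the (Int) indices of the '*' cells of a row suffix enumerated from s
def starsIdx (l : List String) (s : Int) : List Int :=
  ((PySem.List.enumerate l s).filter (fun yc => yc.2 = "*")).map (·.1)

-- ---------- A side: reduce A to a sum over columns ----------

lemma inner_fold_eq (l : List String) (a b : Int) :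
    l.foldl (fun (p : Int × Int) c =>
      (if c = "*" then (1 : Int) else p.1, if c = "B" then p.2 + 1 else p.2)) (a, b)
    = ((if "*" ∈ l then 1 else a), b + (l.count "B" : Int)) := by
  induction l generalizing a b with
  | nil => simp
  | cons c l ih =>
    simp only [List.foldl_cons, ih, List.mem_cons, List.count_cons, beq_iff_eq]
    by_cases hc : c = "*" <;> by_cases hb : c = "B" <;>
      · simp only [hc, hb, Prod.mk.injEq]
        refine ⟨by split_ifs <;> simp_all [eq_comm],
                by split_ifs <;> push_cast <;> ring⟩

lemma foldl_range_getD {α β : Type} (l : List α) (d : α) (f : β → α → β) (init : β) :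
    (List.range l.length).foldl (fun acc x => f acc (l.getD x d)) init = l.foldl f init := by
  induction l generalizing init with
  | nil => simp
  | cons a l ih =>
    rw [List.length_cons, List.range_succ_eq_map, List.foldl_cons, List.foldl_map]
    simpa [List.getD] using ih (f init a)

lemma A_eq (m : List (List String)) :
    findCannons m =
      ((List.range (((PySem.List.pyGet? m (0 : Int)).getD []).length)).map
        (fun y => (if "*" ∈ colAt m y then (1 : Int) else 0) + ((colAt m y).count "B" : Int))).sum := by
  have hbody : ∀ (count : Int) (y : Nat),
      count + ((List.range m.length).foldl (fun (p : Int × Int) (x : Nat) =>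
        (if (PySem.List.pyGet? ((PySem.List.pyGet? m (x : Int)).getD []) (y : Int)).getD "" = "*" then (1 : Int) else p.1,
         if (PySem.List.pyGet? ((PySem.List.pyGet? m (x : Int)).getD []) (y : Int)).getD "" = "B" then p.2 + 1 else p.2)) (0, 0)).1
        + ((List.range m.length).foldl (fun (p : Int × Int) (x : Nat) =>
        (if (PySem.List.pyGet? ((PySem.List.pyGet? m (x : Int)).getD []) (y : Int)).getD "" = "*" then (1 : Int) else p.1,
         if (PySem.List.pyGet? ((PySem.List.pyGet? m (x : Int)).getD []) (y : Int)).getD "" = "B" then p.2 + 1 else p.2)) (0, 0)).2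
      = count + ((if "*" ∈ colAt m y then (1 : Int) else 0) + ((colAt m y).count "B" : Int)) := by
    intro count y
    have hrow : ∀ x : Nat,
        (PySem.List.pyGet? ((PySem.List.pyGet? m (x : Int)).getD []) (y : Int)).getD ""
        = (m.getD x []).getD y "" := by
      intro x; simp [PySem.List.pyGet?_natCast, List.getD]
    simp only [hrow]
    rw [foldl_range_getD m ([] : List String)
          (fun (p : Int × Int) r =>
            (if (r.getD y "") = "*" then (1 : Int) else p.1,
             if (r.getD y "") = "B" then p.2 + 1 else p.2)) (0, 0)]
    have : m.foldl
        (fun (p : Int × Int) r =>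
          (if (r.getD y "") = "*" then (1 : Int) else p.1,
           if (r.getD y "") = "B" then p.2 + 1 else p.2)) (0, 0)
        = (colAt m y).foldl (fun (p : Int × Int) c =>
            (if c = "*" then (1 : Int) else p.1, if c = "B" then p.2 + 1 else p.2)) (0, 0) := by
      simp [colAt, List.foldl_map]
    rw [this, inner_fold_eq]
    ring
  simp only [findCannons]
  have step1 : (List.range (((PySem.List.pyGet? m (0 : Int)).getD []).length)).foldl
      (fun (count : Int) (y : Nat) =>
        count + ((List.range m.length).foldl (fun (p : Int × Int) (x : Nat) =>
          (if (PySem.List.pyGet? ((PySem.List.pyGet? m (x : Int)).getD []) (y : Int)).getD "" = "*" then (1 : Int) else p.1,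
           if (PySem.List.pyGet? ((PySem.List.pyGet? m (x : Int)).getD []) (y : Int)).getD "" = "B" then p.2 + 1 else p.2)) (0, 0)).1
          + ((List.range m.length).foldl (fun (p : Int × Int) (x : Nat) =>
          (if (PySem.List.pyGet? ((PySem.List.pyGet? m (x : Int)).getD []) (y : Int)).getD "" = "*" then (1 : Int) else p.1,
           if (PySem.List.pyGet? ((PySem.List.pyGet? m (x : Int)).getD []) (y : Int)).getD "" = "B" then p.2 + 1 else p.2)) (0, 0)).2) 0
      = (List.range (((PySem.List.pyGet? m (0 : Int)).getD []).length)).foldl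
        (fun (count : Int) (y : Nat) => count + ((if "*" ∈ colAt m y then (1 : Int) else 0) + ((colAt m y).count "B" : Int))) 0 := by
    apply PySem.List.foldl_congr_mem
    intro count y _
    exact hbody count y
  rw [step1, PySem.List.foldl_add]
  ring

-- ---------- B side: reduce B to a row sum plus a star-column set ----------

lemma rowFold (l : List String) (s b : Int) (S : PySem.Set Int) :
    (PySem.List.enumerate l s).foldl cellStep (b, S)
      = (b + (l.count "B" : Int), PySem.Set.update S (starsIdx l s)) := by
  induction l generalizing s b S with
  | nil => simp [starsIdx, PySem.List.enumerate_nil, PySem.Set.update]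
  | cons c l ih =>
    have hstars : starsIdx (c :: l) s
        = (if c = "*" then [s] else []) ++ starsIdx l (s + 1) := by
      simp only [starsIdx, PySem.List.enumerate_cons, List.filter_cons]
      split_ifs with h <;> simp_all
    rw [PySem.List.enumerate_cons, List.foldl_cons]
    by_cases hB : c = "B"
    · subst hB
      rw [show cellStep (b, S) (s, "B") = (b + 1, S) by simp [cellStep], ih, hstars]
      refine Prod.ext ?_ ?_
      · simp [List.count_cons]; ring
      · rw [if_neg (show ¬("B" : String) = "*" by decide), List.nil_append]
    · by_cases hA : c = "*"
      · subst hA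
        rw [show cellStep (b, S) (s, "*") = (b, PySem.Set.add S s) by simp [cellStep], ih, hstars]
        refine Prod.ext ?_ ?_
        · simp [List.count_cons]
        · simp [PySem.Set.update_cons]
      · rw [show cellStep (b, S) (s, c) = (b, S) by simp [cellStep, hB, hA], ih, hstars]
        refine Prod.ext ?_ ?_
        · simp [List.count_cons, hB]
        · simp [hA]

lemma rowStep_eq (width : Nat) (p : Int × PySem.Set Int) (row : List String) :
    rowStep width p row = (PySem.List.enumerate (row.take width) 0).foldl cellStep p := by
  simp [rowStep, PySem.List.slice_to_natCast]

lemma outerFold (m : List (List String)) (width : Nat) (b : Int) (S : PySem.Set Int) :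
    m.foldl (rowStep width) (b, S)
      = (b + (m.map (fun r => ((r.take width).count "B" : Int))).sum,
         PySem.Set.update S (m.flatMap (fun r => starsIdx (r.take width) 0))) := by
  induction m generalizing b S with
  | nil => simp [PySem.Set.update]
  | cons r m ih =>
    rw [List.foldl_cons, rowStep_eq, rowFold, ih]
    refine Prod.ext ?_ ?_
    · show b + ((r.take width).count "B" : Int)
          + (m.map (fun r => ((r.take width).count "B" : Int))).sum
        = b + ((r :: m).map (fun r => ((r.take width).count "B" : Int))).sum
      rw [List.map_cons, List.sum_cons]
      ring
    · show (PySem.Set.update S (starsIdx (r.take width) 0)).update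
          (m.flatMap (fun r => starsIdx (r.take width) 0))
        = PySem.Set.update S ((r :: m).flatMap (fun r => starsIdx (r.take width) 0))
      rw [List.flatMap_cons, PySem.Set.update_append]

lemma mem_starsIdx_zero (l : List String) (y : Int) :
    y ∈ starsIdx l 0 ↔ ∃ (k : Nat) (h : k < l.length), y = (k : Int) ∧ l[k] = "*" := by
  simp only [starsIdx, List.mem_map, List.mem_filter]
  constructor
  · rintro ⟨⟨i, c⟩, ⟨hmem, hstar⟩, rfl⟩
    obtain ⟨k, hk, heq⟩ := (PySem.List.mem_enumerate_iff _ _ _).mp hmem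
    obtain ⟨h1, h2⟩ := Prod.mk.injEq .. ▸ heq
    exact ⟨k, hk, by simpa using h1, by rw [← h2]; simpa using of_decide_eq_true hstar⟩
  · rintro ⟨k, hk, rfl, hstar⟩
    exact ⟨((k : Int), l[k]), ⟨(PySem.List.mem_enumerate_iff _ _ _).mpr ⟨k, hk, by simp⟩,
      by simpa using hstar⟩, rfl⟩

lemma take_eq_range_map (l : List String) (W : Nat) (h : W ≤ l.length) :
    l.take W = (List.range W).map (fun y => l.getD y "") := by
  apply List.ext_getElem
  · simp [h]
  · intro i h1 h2
    simp only [List.getElem_take, List.getElem_map, List.getElem_range]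
    rw [List.getD_eq_getElem]

lemma sum_swap {α β : Type} (xs : List α) (ys : List β) (f : α → β → Int) :
    (xs.map (fun x => (ys.map (f x)).sum)).sum = (ys.map (fun y => (xs.map (fun x => f x y)).sum)).sum := by
  induction xs with
  | nil => simp
  | cons x xs ih =>
    simp only [List.map_cons, List.sum_cons, ih]
    rw [PySem.List.sum_map_add_int]

-- the star-column set built by B has the same members as the filtered range
lemma stars_mem_iff (m : List (List String)) (W : Nat)
    (hall : ∀ r ∈ m, W ≤ r.length) (y : Int) :
    y ∈ m.flatMap (fun r => starsIdx (r.take W) 0)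
      ↔ y ∈ ((List.range W).filter (fun k => decide ("*" ∈ colAt m k))).map (Nat.cast : Nat → Int) := by
  simp only [List.mem_flatMap, List.mem_map, List.mem_filter, List.mem_range]
  constructor
  · rintro ⟨r, hr, hy⟩
    obtain ⟨k, hk, rfl, hstar⟩ := (mem_starsIdx_zero _ _).mp hy
    have hlen : W ≤ r.length := hall r hr
    have hkW : k < W := by simpa [Nat.lt_min, hlen] using hk
    refine ⟨k, ⟨hkW, ?_⟩, rfl⟩
    have : r.getD k "" = "*" := by
      rw [List.getD_eq_getElem r "" (by omega)]
      simpa [List.getElem_take] using hstar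
    simp only [decide_eq_true_eq, colAt, List.mem_map]
    exact ⟨r, hr, this⟩
  · rintro ⟨k, ⟨hkW, hstar⟩, rfl⟩
    simp only [decide_eq_true_eq, colAt, List.mem_map] at hstar
    obtain ⟨r, hr, hget⟩ := hstar
    have hlen : W ≤ r.length := hall r hr
    refine ⟨r, hr, (mem_starsIdx_zero _ _).mpr ⟨k, by simp [Nat.lt_min]; omega, rfl, ?_⟩⟩
    rw [List.getElem_take]
    rw [List.getD_eq_getElem r "" (by omega)] at hget
    exact hget

lemma sum_ind {α : Type} (p : α → Prop) [DecidablePred p] (l : List α) :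
    (l.map (fun x => if p x then (1 : Int) else 0)).sum = ((l.countP (fun x => decide (p x))) : Int) := by
  induction l with
  | nil => simp
  | cons x l ih =>
    simp only [List.map_cons, List.sum_cons, List.countP_cons, ih]
    by_cases h : p x
    · simp [h]; ring
    · simp [h]

lemma count_as_countP (xs : List α) (g : α → String) :
    ((xs.map g).count "B" : Int) = ((xs.countP (fun x => decide (g x = "B"))) : Int) := by
  congr 1
  rw [List.count_eq_countP, List.countP_map]
  apply List.countP_congr
  intro x _
  rw [Bool.eq_iff_iff]
  simp [Function.comp]

lemma count_eq_sum_ind (l : List String) (W : Nat) (h : W ≤ l.length) :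
    ((l.take W).count "B" : Int)
      = ((List.range W).map (fun y => if l.getD y "" = "B" then (1 : Int) else 0)).sum := by
  rw [take_eq_range_map l W h, count_as_countP, sum_ind]

lemma colCount_eq_sum (m : List (List String)) (y : Nat) :
    ((colAt m y).count "B" : Int)
      = (m.map (fun r => if r.getD y "" = "B" then (1 : Int) else 0)).sum := by
  rw [colAt, count_as_countP, sum_ind]

-- ===== VERDICT (by name: the statement is the Claim_ definition above) =====
theorem findCannons_spec : Claim_equal_findCannons := by
  intro m _ hpre
  obtain ⟨hne, hall⟩ := hpre
  unfold Spec_findCannons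
  set W := ((PySem.List.pyGet? m (0 : Int)).getD []).length with hW
  have hW0 : W = (m.headD []).length := by
    cases m with
    | nil => exact absurd rfl hne
    | cons r rs => simp [hW]
  have hall' : ∀ r ∈ m, W ≤ r.length := by rw [hW0]; exact hall
  -- B's value
  have hB : findCannons_alt m
      = (m.map (fun r => ((r.take W).count "B" : Int))).sum
        + ((PySem.Set.ofList (m.flatMap (fun r => starsIdx (r.take W) 0))).length : Int) := by
    show (m.foldl (rowStep W) ((0 : Int), ([] : List Int))).1
        + (((m.foldl (rowStep W) ((0 : Int), ([] : List Int))).2).length : Int) = _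
    rw [outerFold m W 0 ([] : List Int), PySem.Set.update_nil_left]
    simp
  -- the star set's length = number of star columns
  have hstars : (PySem.Set.ofList (m.flatMap (fun r => starsIdx (r.take W) 0))).length
      = ((List.range W).filter (fun k => decide ("*" ∈ colAt m k))).length := by
    have hperm : (PySem.Set.ofList (m.flatMap (fun r => starsIdx (r.take W) 0))).Perm
        (((List.range W).filter (fun k => decide ("*" ∈ colAt m k))).map (Nat.cast : Nat → Int)) := by
      rw [List.perm_ext_iff_of_nodup (PySem.Set.nodup_ofList _)
        (List.Nodup.map Nat.cast_injective ((List.nodup_range).filter _))]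
      intro y
      rw [PySem.Set.mem_ofList]
      exact stars_mem_iff m W hall' y
    rw [hperm.length_eq, List.length_map]
  rw [A_eq, hB, hstars, PySem.List.sum_map_add_int]
  have hflag : ((List.range W).map (fun y => if "*" ∈ colAt m y then (1 : Int) else 0)).sum
      = (((List.range W).filter (fun k => decide ("*" ∈ colAt m k))).length : Int) := by
    rw [sum_ind, List.countP_eq_length_filter]
  have hcnt : ((List.range W).map (fun y => ((colAt m y).count "B" : Int))).sum
      = (m.map (fun r => ((r.take W).count "B" : Int))).sum := by
    calc ((List.range W).map (fun y => ((colAt m y).count "B" : Int))).sum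
        = ((List.range W).map (fun y => (m.map (fun r => if r.getD y "" = "B" then (1 : Int) else 0)).sum)).sum := by
          apply congrArg
          exact List.map_congr_left (fun y _ => colCount_eq_sum m y)
      _ = (m.map (fun r => ((List.range W).map (fun y => if r.getD y "" = "B" then (1 : Int) else 0)).sum)).sum :=
          (sum_swap m (List.range W) (fun r y => if r.getD y "" = "B" then (1 : Int) else 0)).symm
      _ = (m.map (fun r => ((r.take W).count "B" : Int))).sum := by
          apply congrArg
          exact List.map_congr_left (fun r hr => (count_eq_sum_ind r W (hall' r hr)).symm)
  rw [hflag, hcnt]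
  ring
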